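-- pv_equiv track=rewrite | github.com/simulatedScience/Twisty_Puzzle_Program | src/puzzle_analysis_modules/piece_detection_v2.py | split_moves
-- ===== SOURCE A (Python) =====
-- def split_moves(
--         moves: dict[str, list[list[int]]],
--         n_points: int,
--         inverse_dict: dict[str, str]=None,
--     ) -> tuple[list[set[int]], list[set[int]], set[frozenset]]:
--     """
--     For each move, calculate the pieces it necessitates by itself. Returns a list of partitions of {1, ..., `n_points`}.
--
--     Args:
--         moves (dict[str, list[list[int]]]): dictionary with move names and cycle lists
--             every move is represented as a list of cycles
--                 describing the move
--         n_points (int): number of points in the puzzle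
--         inverse_dict (dict[str, str]): dictionary that assigns inverse moves for each move where one exists.
--             keys and values are both move names
--
--     Returns:
--         list[list[set[int]]]: list of pieces necessitated by each move. May be shorter than the number of moves since inverse moves are skipped because they yield the same pieces as the original move.
--     """
--     move_pieces = list()
--     if inverse_dict:
--         calculated_moves: set[str] = set()
--     for move_name, cycles in moves.items():
--         # skip move if it's inverse was already investigated
--         if inverse_dict:
--             if move_name in inverse_dict and inverse_dict[move_name] in calculated_moves:
--                 continue
--             calculated_moves.add(move_name)
--         # save pieces forced by each move
--         move_pieces.append(split_move(cycles, n_points))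
--     return move_pieces
--
-- def split_move(move: list[list[int]], n_points: int) -> tuple[list[set[int]], set[int], set[frozenset]]:
--     """
--     Calculate the pieces that are enforced just by applying the given move.
--     This splits the puzzle into:
--     - one piece for the points unaffected by the move
--     - one piece for each unique cycle length in the move
--
--     Algorithm:
--     1. sort cycles by length
--     2. join cycles of the same length into one piece for each cycle length
--
--     Args:
--         move (list[list[int]]): list of cycles as lists of integers representing a move
--         n_points (int): number of points in the puzzle
--
--     Returns:
--         list[set[int]]: list of pieces as sets of integers
--         set[int]: set of all points affected by the given move
--         set[frozenset[int]]: set of all cycles as sets of all affected points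
--     """
--     move_pieces = list()
--     sorted_cycles = sorted(move, key=len)
--     last_len = 0
--     for cycle in sorted_cycles:
--         if len(cycle) == 1: # ignore cycles with only one point
--             continue
--         if last_len != len(cycle):
--             move_pieces.append(set())
--         # add cycle to the last piece that collects cycles of the same length
--         move_pieces[-1] |= set(cycle)
--         last_len = len(cycle)
--
--     # generate one piece for the unchanged part of the puzzle
--     unchanged_piece = set()
--     for n in range(n_points):
--         for piece in move_pieces:
--             if n in piece:
--                 break
--         else:
--             unchanged_piece.add(n)
--     if len(unchanged_piece) > 0:
--         move_pieces.append(unchanged_piece)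
--
--     return move_pieces
-- ===== SOURCE B (Python) =====
-- def split_moves(moves, n_points, inverse_dict=None):
--     """Re-implementation: never sorts the cycle list; per move it sorts the
--     distinct cycle lengths and collects, for each length, the points of all
--     cycles of that length in one scan; the unchanged piece is the range
--     filtered against a precomputed affected set."""
--     if inverse_dict:
--         kept = []
--         calculated = set()
--         for name, cycles in moves.items():
--             inv = inverse_dict.get(name)
--             if inv is None or inv not in calculated:
--                 calculated.add(name)
--                 kept.append(cycles)
--     else:
--         kept = list(moves.values())
--     return [_pieces_by_length(cycles, n_points) for cycles in kept]
--
--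
-- def _pieces_by_length(cycles, n_points):
--     lengths = sorted({len(c) for c in cycles if len(c) > 1})
--     pieces = []
--     affected = set()
--     for length in lengths:
--         piece = set()
--         for c in cycles:
--             if len(c) == length:
--                 piece |= set(c)
--         pieces.append(piece)
--         affected |= piece
--     unchanged = {n for n in range(n_points) if n not in affected}
--     if unchanged:
--         pieces.append(unchanged)
--     return pieces
-- ===== Notes on version B (the rewrite author's own statement) =====
-- stated objective: alternative
-- what changed: B never sorts the cycle list: per move it sorts the set of distinct cycle lengths and, for each length, gathers the points of all cycles of that length in one scan over the original cycle list, and it computes the unchanged piece by filtering range(n_points) against one precomputed affected set instead of A's per-point scan over every piece; the outer loop is split into a keep-filter pass followed by a map instead of A's fused loop.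
-- outside the precondition, e.g. on split_moves({'a': [[0, 1]], 'b': [[]]}, 2, {'b': 'a'}): A returns [[{0, 1}]], B returns [[{0, 1}]]
import Mathlib
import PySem

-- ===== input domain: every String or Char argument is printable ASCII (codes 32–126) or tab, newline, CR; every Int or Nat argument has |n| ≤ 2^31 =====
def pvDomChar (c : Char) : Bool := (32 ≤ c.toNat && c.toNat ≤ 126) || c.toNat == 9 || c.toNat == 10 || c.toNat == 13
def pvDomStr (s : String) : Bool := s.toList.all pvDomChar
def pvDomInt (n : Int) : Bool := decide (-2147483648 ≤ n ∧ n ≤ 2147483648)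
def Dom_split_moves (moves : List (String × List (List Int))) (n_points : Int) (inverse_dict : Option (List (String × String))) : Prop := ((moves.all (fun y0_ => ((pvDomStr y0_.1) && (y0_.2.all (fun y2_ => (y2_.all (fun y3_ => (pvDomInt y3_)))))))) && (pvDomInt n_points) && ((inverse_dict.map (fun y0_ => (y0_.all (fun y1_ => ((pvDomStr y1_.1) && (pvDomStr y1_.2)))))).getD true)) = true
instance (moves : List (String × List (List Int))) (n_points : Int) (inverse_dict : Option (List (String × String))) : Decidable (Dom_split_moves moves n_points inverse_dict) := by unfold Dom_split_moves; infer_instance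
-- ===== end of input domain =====

-- B sorts the distinct cycle lengths and collects each length's points in one scan over the original cycle list (no sort of the cycles), and filters the range against one affected set, replacing A's sort-and-run scan and per-point scan over all pieces (objective: alternative).


-- ===== PORT A =====
-- move_pieces[-1] |= set(cycle): in-place update of the last list element ([] stays [],
-- Python raises IndexError there — excluded by Pre_)
def pvUpdateLast (f : List Int → List Int) : List (List Int) → List (List Int)
  | [] => []
  | [a] => [f a]
  | a :: b :: rest => a :: pvUpdateLast f (b :: rest)

def split_move (move : List (List Int)) (n_points : Int) : List (List Int) :=
  let sorted_cycles := PySem.List.sorted move (fun c => (c.length : Int)) false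
  let st := sorted_cycles.foldl (fun (st : List (List Int) × Int) cycle =>
      if (cycle.length : Int) = 1 then st
      else
        (pvUpdateLast (fun s => PySem.Set.union s (PySem.Set.ofList cycle))
          (if st.2 ≠ (cycle.length : Int) then st.1 ++ [[]] else st.1),
         (cycle.length : Int)))
    ([], 0)
  let move_pieces := st.1
  let unchanged_piece := (PySem.List.pyRange 0 n_points 1).foldl
      (fun u n => if move_pieces.any (fun p => p.contains n) then u else PySem.Set.add u n) []
  if unchanged_piece.length > 0 then move_pieces ++ [unchanged_piece] else move_pieces

def split_moves (moves : List (String × List (List Int))) (n_points : Int) (inverse_dict : Option (List (String × String))) : List (List (List Int)) :=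
  let movesD := PySem.Dict.ofList moves
  let invD := PySem.Dict.ofList (inverse_dict.getD [])
  -- `if inverse_dict:` — None and the empty dict are falsy
  let useInv := inverse_dict.getD [] ≠ []
  (movesD.items.foldl (fun (st : PySem.Set String × List (List (List Int))) p =>
      if useInv then
        match invD.get? p.1 with
        | some i => if st.1.contains i then st
                    else (PySem.Set.add st.1 p.1, st.2 ++ [split_move p.2 n_points])
        | none => (PySem.Set.add st.1 p.1, st.2 ++ [split_move p.2 n_points])
      else (st.1, st.2 ++ [split_move p.2 n_points]))
    (PySem.Set.empty, [])).2

-- ===== PORT B =====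
-- sorted({len(c) for c in cycles if len(c) > 1}), then one scan over `cycles` per distinct length
def split_move_fast (move : List (List Int)) (n_points : Int) : List (List Int) :=
  let lengths := PySem.List.sorted
      (PySem.Set.ofList (move.filterMap (fun c => if (c.length : Int) > 1 then some ((c.length : Int)) else none)))
      (fun x => x) false
  let st := lengths.foldl (fun (st : List (List Int) × List Int) length =>
      let piece := move.foldl
          (fun (p : List Int) c => if (c.length : Int) = length then PySem.Set.union p (PySem.Set.ofList c) else p) []
      (st.1 ++ [piece], PySem.Set.union st.2 piece)) ([], [])
  let unchanged := (PySem.List.pyRange 0 n_points 1).filter (fun n => !(st.2.contains n))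
  if unchanged ≠ [] then st.1 ++ [unchanged] else st.1

def split_moves_alt (moves : List (String × List (List Int))) (n_points : Int) (inverse_dict : Option (List (String × String))) : List (List (List Int)) :=
  let movesD := PySem.Dict.ofList moves
  let kept :=
    if inverse_dict.getD [] ≠ [] then
      (movesD.items.foldl (fun (st : PySem.Set String × List (List (List Int))) p =>
          match (PySem.Dict.ofList (inverse_dict.getD [])).get? p.1 with
          | some i => if st.1.contains i then st
                      else (PySem.Set.add st.1 p.1, st.2 ++ [p.2])
          | none => (PySem.Set.add st.1 p.1, st.2 ++ [p.2]))
        (PySem.Set.empty, [])).2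
    else PySem.Dict.values movesD
  kept.map (fun cycles => split_move_fast cycles n_points)

-- ===== PRECONDITION & SPEC =====
-- Pre_ excludes inputs where some move contains an empty cycle: on a processed move with an empty
-- cycle A raises IndexError (move_pieces[-1] on an empty piece list); for a closed-form condition
-- it covers every move, including moves the inverse-skip logic would skip (there A and B agree).
def Pre_split_moves (moves : List (String × List (List Int))) (n_points : Int) (inverse_dict : Option (List (String × String))) : Prop :=
  ∀ p ∈ moves, ∀ c ∈ p.2, c ≠ ([] : List Int)
instance (moves : List (String × List (List Int))) (n_points : Int) (inverse_dict : Option (List (String × String))) : Decidable (Pre_split_moves moves n_points inverse_dict) := by unfold Pre_split_moves; infer_instance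

def pvWitness_split_moves : (List (String × List (List Int))) × Int × (Option (List (String × String))) :=
  ([("f", [[0, 1], [2, 3], [4, 5, 6]]), ("f'", [[1, 0], [3, 2], [6, 5, 4]])], 8, some [("f", "f'"), ("f'", "f")])

def Spec_split_moves (moves : List (String × List (List Int))) (n_points : Int) (inverse_dict : Option (List (String × String))) (out : List (List (List Int))) : Prop := out = split_moves_alt moves n_points inverse_dict
instance (moves : List (String × List (List Int))) (n_points : Int) (inverse_dict : Option (List (String × String))) (out : List (List (List Int))) : Decidable (Spec_split_moves moves n_points inverse_dict out) := by unfold Spec_split_moves; infer_instance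

-- ===== CLAIM (what is proved, stated in full; the proofs are below) =====
def Claim_equal_split_moves : Prop := ∀ (moves : List (String × List (List Int))) (n_points : Int) (inverse_dict : Option (List (String × String))), Dom_split_moves moves n_points inverse_dict → Pre_split_moves moves n_points inverse_dict → Spec_split_moves moves n_points inverse_dict (split_moves moves n_points inverse_dict)

-- ===== LEMMAS AND PROOFS =====

theorem pvUpdateLast_append (f : List Int → List Int) (xs : List (List Int)) (a : List Int) :
    pvUpdateLast f (xs ++ [a]) = xs ++ [f a] := by
  induction xs with
  | nil => rfl
  | cons x xs ih => cases xs <;> simp_all [pvUpdateLast]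

theorem pvUnion_ofList (s : PySem.Set Int) (xs : List Int) :
    PySem.Set.union s (PySem.Set.ofList xs) = PySem.Set.update s xs := by
  show PySem.Set.update s (PySem.Set.ofList xs) = PySem.Set.update s xs
  rw [PySem.Set.update_eq_append_filter, PySem.Set.update_eq_append_filter,
    PySem.Set.ofList_ofList]

-- A's run scan over the sorted cycles produces the values of the length-keyed dict built by the
-- same fold (proof device: the dict fold is a bookkeeping intermediary, not part of either port)
theorem pvLoopAB (ss : List (List Int)) :
    ∀ (d : PySem.Dict Int (List Int)) (pieces : List (List Int)) (ll : Int),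
    ss.Pairwise (fun a b => (a.length : Int) ≤ (b.length : Int)) →
    (∀ c ∈ ss, c ≠ []) →
    (∀ c ∈ ss, ll ≤ (c.length : Int)) →
    pieces = PySem.Dict.values d →
    ((d.items = [] ∧ ll = 0) ∨ ∃ pre v, d.items = pre ++ [(ll, v)]) →
    (∀ k ∈ d.keys, k ≤ ll) →
    d.keys.Nodup →
    (ss.foldl (fun (st : List (List Int) × Int) cycle =>
      if (cycle.length : Int) = 1 then st
      else
        (pvUpdateLast (fun s => PySem.Set.union s (PySem.Set.ofList cycle))
          (if st.2 ≠ (cycle.length : Int) then st.1 ++ [[]] else st.1),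
         (cycle.length : Int))) (pieces, ll)).1
    = PySem.Dict.values (ss.foldl (fun (d : PySem.Dict Int (List Int)) cycle =>
        if (cycle.length : Int) > 1 then
          PySem.Dict.modify d (cycle.length : Int) [] (fun s => PySem.Set.update s cycle)
        else d) d) := by
  induction ss with
  | nil => intro d pieces ll _ _ _ hval _ _ _; simpa using hval
  | cons c t ih =>
    intro d pieces ll hpw hne hll hval hlast hkeys hnd
    have hc1 : (1 : Int) ≤ (c.length : Int) := by
      have : c ≠ [] := hne c (by simp)
      have : 0 < c.length := List.length_pos_iff.mpr this
      omega
    have hpwt : t.Pairwise (fun a b => (a.length : Int) ≤ (b.length : Int)) := hpw.tail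
    have hnet : ∀ c' ∈ t, c' ≠ [] := fun c' h => hne c' (by simp [h])
    by_cases h1 : (c.length : Int) = 1
    · rw [List.foldl_cons, List.foldl_cons, if_pos h1,
        if_neg (by omega : ¬ ((c.length : Int) > 1))]
      exact ih d pieces ll hpwt hnet (fun c' h => hll c' (by simp [h])) hval hlast hkeys hnd
    · have hL2 : (2 : Int) ≤ (c.length : Int) := by omega
      have hgt : ((c.length : Int) > 1) := by omega
      have hllc : ll ≤ (c.length : Int) := hll c (by simp)
      have hllt : ∀ c' ∈ t, (c.length : Int) ≤ (c'.length : Int) := by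
        intro c' h; exact (List.pairwise_cons.mp hpw).1 c' h
      simp only [List.foldl_cons, if_neg h1, if_pos hgt]
      by_cases heq : ll = (c.length : Int)
      · -- same length as the previous cycle: update the last piece in place
        rcases hlast with ⟨hitems, hll0⟩ | ⟨pre, v, hitems⟩
        · omega
        · have hkeyseq : d.keys = List.map Prod.fst pre ++ [ll] := by
            simp [PySem.Dict.keys, hitems]
          have hnotmem : ll ∉ List.map Prod.fst pre := by
            rw [hkeyseq] at hnd
            exact fun hmem =>
              (List.nodup_append.mp hnd).2.2 ll hmem ll (List.mem_singleton_self ll) rfl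
          have hcont : d.contains ll = true := by
            rw [PySem.Dict.contains_iff_mem_keys, hkeyseq]; simp
          have hgetD : d.getD ll [] = v :=
            PySem.Dict.getD_of_mem_items d (by simp [hitems]) hnd []
          have hmodify : (PySem.Dict.modify d (c.length : Int) [] (fun s => PySem.Set.update s c)).items
              = pre ++ [(ll, PySem.Set.update v c)] := by
            rw [← heq]
            show (d.insert ll ((fun s => PySem.Set.update s c) (d.getD ll []))).items = _
            rw [PySem.Dict.items_insert_of_contains d _ hcont, hitems]
            rw [List.map_append]
            congr 1
            · conv_rhs => rw [← List.map_id pre]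
              apply List.map_congr_left
              intro p hp
              have hpne : p.1 ≠ ll := fun h => hnotmem (h ▸ List.mem_map_of_mem hp)
              simp [hpne]
            · simp [hgetD]
          have hvals' : PySem.Dict.values (PySem.Dict.modify d (c.length : Int) [] (fun s => PySem.Set.update s c))
              = List.map Prod.snd pre ++ [PySem.Set.update v c] := by
            simp [PySem.Dict.values, hmodify]
          have hkeys' : (PySem.Dict.modify d (c.length : Int) [] (fun s => PySem.Set.update s c)).keys
              = d.keys := by
            simp [PySem.Dict.keys, hmodify, hitems]
          have hA : (if ll ≠ (c.length : Int) then pieces ++ [[]] else pieces) = pieces := by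
            rw [if_neg (not_not_intro heq)]
          rw [hA]
          have hpieces : pieces = List.map Prod.snd pre ++ [v] := by
            rw [hval]; simp [PySem.Dict.values, hitems]
          have hupd : pvUpdateLast (fun s => PySem.Set.union s (PySem.Set.ofList c)) pieces
              = List.map Prod.snd pre ++ [PySem.Set.update v c] := by
            rw [hpieces, pvUpdateLast_append, pvUnion_ofList]
          rw [hupd]
          refine ih _ _ _ hpwt hnet hllt hvals'.symm ?_ ?_ ?_
          · right; exact ⟨pre, PySem.Set.update v c, by rw [hmodify, heq]⟩
          · intro k hk; rw [hkeys'] at hk; exact le_trans (hkeys k hk) hllc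
          · rw [hkeys']; exact hnd
      · -- strictly longer cycle: a fresh piece / fresh dict key is appended
        have hlt : ll < (c.length : Int) := lt_of_le_of_ne hllc heq
        have hnotin : (c.length : Int) ∉ d.keys := fun hmem => by
          have := hkeys _ hmem; omega
        have hcont : d.contains (c.length : Int) = false := by
          by_contra h
          exact hnotin ((PySem.Dict.contains_iff_mem_keys d _).mp (by simpa using h))
        have hmodify : (PySem.Dict.modify d (c.length : Int) [] (fun s => PySem.Set.update s c)).items
            = d.items ++ [((c.length : Int), PySem.Set.ofList c)] := by
          show (d.insert _ ((fun s => PySem.Set.update s c) (d.getD _ []))).items = _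
          rw [PySem.Dict.items_insert_of_not_contains d _ hcont,
            PySem.Dict.getD_of_not_contains d [] hcont]
          simp [PySem.Set.update_nil_left]
        have hvals' : PySem.Dict.values (PySem.Dict.modify d (c.length : Int) [] (fun s => PySem.Set.update s c))
            = PySem.Dict.values d ++ [PySem.Set.ofList c] := by
          simp [PySem.Dict.values, hmodify]
        have hkeys' : (PySem.Dict.modify d (c.length : Int) [] (fun s => PySem.Set.update s c)).keys
            = d.keys ++ [(c.length : Int)] := by
          simp [PySem.Dict.keys, hmodify]
        have hA : (if ll ≠ (c.length : Int) then pieces ++ [[]] else pieces) = pieces ++ [[]] := by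
          rw [if_pos heq]
        rw [hA, pvUpdateLast_append]
        have hunit : PySem.Set.union ([] : PySem.Set Int) (PySem.Set.ofList c) = PySem.Set.ofList c := by
          rw [pvUnion_ofList, PySem.Set.update_nil_left]
        rw [hunit]
        refine ih _ _ _ hpwt hnet hllt ?_ ?_ ?_ ?_
        · rw [hvals', hval]
        · right; exact ⟨d.items, PySem.Set.ofList c, hmodify⟩
        · intro k hk; rw [hkeys'] at hk
          rcases List.mem_append.mp hk with h | h
          · exact le_trans (hkeys k h) hllc
          · simp at h; omega
        · rw [hkeys']
          rw [List.nodup_append]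
          refine ⟨hnd, List.nodup_singleton _, ?_⟩
          intro a ha b hb hab
          subst hab
          rw [List.mem_singleton] at hb
          subst hb
          exact hnotin ha

-- keys of the dict fold: strictly increasing, and exactly the cycle lengths > 1
theorem pvKeysFold (ss : List (List Int)) :
    ∀ (d : PySem.Dict Int (List Int)) (ll : Int),
    ss.Pairwise (fun a b => (a.length : Int) ≤ (b.length : Int)) →
    (∀ c ∈ ss, ll ≤ (c.length : Int)) →
    d.keys.Pairwise (· < ·) →
    (∀ k ∈ d.keys, k ≤ ll) →
    ((ss.foldl (fun (d : PySem.Dict Int (List Int)) cycle =>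
        if (cycle.length : Int) > 1 then
          PySem.Dict.modify d (cycle.length : Int) [] (fun s => PySem.Set.update s cycle)
        else d) d).keys.Pairwise (· < ·)) ∧
    (∀ k, k ∈ (ss.foldl (fun (d : PySem.Dict Int (List Int)) cycle =>
        if (cycle.length : Int) > 1 then
          PySem.Dict.modify d (cycle.length : Int) [] (fun s => PySem.Set.update s cycle)
        else d) d).keys ↔ k ∈ d.keys ∨ ∃ c ∈ ss, 1 < (c.length : Int) ∧ k = (c.length : Int)) := by
  induction ss with
  | nil => intro d ll _ _ hpw _; simpa using hpw
  | cons c t ih =>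
    intro d ll hpw hll hkpw hkle
    have hpwt := hpw.tail
    have hllt : ∀ c' ∈ t, (c.length : Int) ≤ (c'.length : Int) :=
      fun c' h => (List.pairwise_cons.mp hpw).1 c' h
    by_cases hgt : (c.length : Int) > 1
    · simp only [List.foldl_cons, if_pos hgt]
      have hllc : ll ≤ (c.length : Int) := hll c (by simp)
      by_cases hcont : d.contains (c.length : Int) = true
      · have hkeq : (PySem.Dict.modify d (c.length : Int) [] (fun s => PySem.Set.update s c)).keys = d.keys := by
          rw [PySem.Dict.keys_modify, PySem.Dict.keys_insert_of_contains _ _ hcont]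
        have := ih (PySem.Dict.modify d (c.length : Int) [] (fun s => PySem.Set.update s c))
          (c.length : Int) hpwt hllt (by rw [hkeq]; exact hkpw)
          (by rw [hkeq]; intro k hk; exact le_trans (hkle k hk) hllc)
        refine ⟨this.1, fun k => ?_⟩
        rw [this.2 k, hkeq]
        constructor
        · rintro (h | h)
          · exact Or.inl h
          · exact Or.inr (by rcases h with ⟨c', hc', h1, h2⟩; exact ⟨c', by simp [hc'], h1, h2⟩)
        · rintro (h | ⟨c', hc', h1, h2⟩)
          · exact Or.inl h
          · rcases List.mem_cons.mp hc' with rfl | hc'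
            · exact Or.inl (h2 ▸ (PySem.Dict.contains_iff_mem_keys d _).mp hcont)
            · exact Or.inr ⟨c', hc', h1, h2⟩
      · have hnotin : (c.length : Int) ∉ d.keys := fun h => hcont ((PySem.Dict.contains_iff_mem_keys d _).mpr h)
        have hkeq : (PySem.Dict.modify d (c.length : Int) [] (fun s => PySem.Set.update s c)).keys
            = d.keys ++ [(c.length : Int)] := by
          rw [PySem.Dict.keys_modify, PySem.Dict.keys_insert_of_not_contains _ _ (by simpa using hcont)]
        have hkpw' : (d.keys ++ [(c.length : Int)]).Pairwise (· < ·) := by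
          rw [List.pairwise_append]
          refine ⟨hkpw, List.pairwise_singleton _ _, ?_⟩
          intro a ha b hb
          rw [List.mem_singleton] at hb; subst hb
          exact lt_of_le_of_ne (le_trans (hkle a ha) hllc) (fun h => hnotin (h ▸ ha))
        have := ih (PySem.Dict.modify d (c.length : Int) [] (fun s => PySem.Set.update s c))
          (c.length : Int) hpwt hllt (by rw [hkeq]; exact hkpw')
          (by rw [hkeq]; intro k hk
              rcases List.mem_append.mp hk with h | h
              · exact le_trans (hkle k h) hllc
              · simp at h; omega)
        refine ⟨this.1, fun k => ?_⟩
        rw [this.2 k, hkeq]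
        constructor
        · rintro (h | h)
          · rcases List.mem_append.mp h with h | h
            · exact Or.inl h
            · rw [List.mem_singleton] at h; exact Or.inr ⟨c, by simp, hgt, h⟩
          · exact Or.inr (by rcases h with ⟨c', hc', h1, h2⟩; exact ⟨c', by simp [hc'], h1, h2⟩)
        · rintro (h | ⟨c', hc', h1, h2⟩)
          · exact Or.inl (List.mem_append.mpr (Or.inl h))
          · rcases List.mem_cons.mp hc' with rfl | hc'
            · exact Or.inl (List.mem_append.mpr (Or.inr (by simp [h2])))
            · exact Or.inr ⟨c', hc', h1, h2⟩
    · simp only [List.foldl_cons, if_neg hgt]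
      have := ih d ll hpwt
        (fun c' h => le_trans (hll c (by simp)) (hllt c' h)) hkpw
        (by intro k hk; exact hkle k hk)
      refine ⟨this.1, fun k => ?_⟩
      rw [this.2 k]
      constructor
      · rintro (h | ⟨c', hc', h1, h2⟩)
        · exact Or.inl h
        · exact Or.inr ⟨c', by simp [hc'], h1, h2⟩
      · rintro (h | ⟨c', hc', h1, h2⟩)
        · exact Or.inl h
        · rcases List.mem_cons.mp hc' with rfl | hc'
          · exact absurd h1 hgt
          · exact Or.inr ⟨c', hc', h1, h2⟩

-- value of the dict fold at a key: the update-fold over the cycles of that length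
theorem pvGetDFold (ss : List (List Int)) :
    ∀ (d : PySem.Dict Int (List Int)) (L : Int),
    (ss.foldl (fun (d : PySem.Dict Int (List Int)) cycle =>
        if (cycle.length : Int) > 1 then
          PySem.Dict.modify d (cycle.length : Int) [] (fun s => PySem.Set.update s cycle)
        else d) d).getD L []
    = (ss.filter (fun c => decide (1 < (c.length : Int)) && decide ((c.length : Int) = L))).foldl
        (fun s c => PySem.Set.update s c) (d.getD L []) := by
  induction ss with
  | nil => intro d L; rfl
  | cons c t ih =>
    intro d L
    rw [List.foldl_cons, List.filter_cons]
    by_cases hgt : (1 : Int) < (c.length : Int)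
    · rw [if_pos hgt]
      by_cases hL : (c.length : Int) = L
      · have hgt' : (1 : Int) < L := hL ▸ hgt
        have hcond : (decide (1 < (c.length : Int)) && decide ((c.length : Int) = L)) = true := by
          simp [hL, hgt']
        rw [hcond, if_pos rfl, List.foldl_cons, ih]
        congr 1
        rw [PySem.Dict.getD_modify, if_pos hL.symm, hL]
      · have hcond : (decide (1 < (c.length : Int)) && decide ((c.length : Int) = L)) = false := by
          simp [hL]
        rw [hcond, if_neg (by simp), ih]
        congr 1
        rw [PySem.Dict.getD_modify, if_neg (fun h => hL h.symm)]
    · have hcond : (decide (1 < (c.length : Int)) && decide ((c.length : Int) = L)) = false := by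
        simp [hgt]
      rw [if_neg hgt, hcond, if_neg (by simp), ih]

-- stability of the insertion sort: filtering one length out of sorted(move, key=len) gives the
-- cycles of that length in their original order
theorem pvInsPairwise (x : List Int) (acc : List (List Int))
    (h : acc.Pairwise (fun a b => (a.length : Int) ≤ (b.length : Int))) :
    (PySem.List.insertBy (fun a b => decide ((a.length : Int) < (b.length : Int))) x acc).Pairwise
      (fun a b => (a.length : Int) ≤ (b.length : Int)) := by
  induction acc with
  | nil => simp [PySem.List.insertBy]
  | cons y ys ih =>
    rw [PySem.List.insertBy]
    rcases List.pairwise_cons.mp h with ⟨hy, hys⟩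
    by_cases hb : (x.length : Int) < (y.length : Int)
    · simp only [decide_eq_true_eq, hb, if_pos]
      rw [List.pairwise_cons]
      refine ⟨?_, h⟩
      intro z hz
      rcases List.mem_cons.mp hz with rfl | hz
      · omega
      · have := hy z hz; omega
    · simp only [decide_eq_true_eq, hb, if_neg, if_false]
      rw [List.pairwise_cons]
      refine ⟨?_, ih hys⟩
      intro z hz
      rcases (PySem.List.mem_insertBy _ _ _ _).mp hz with rfl | hz
      · omega
      · exact hy z hz

theorem pvFilterInsertBy (L : Int) (x : List Int) (acc : List (List Int))
    (h : acc.Pairwise (fun a b => (a.length : Int) ≤ (b.length : Int))) :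
    (PySem.List.insertBy (fun a b => decide ((a.length : Int) < (b.length : Int))) x acc).filter
        (fun c => decide ((c.length : Int) = L))
    = if (x.length : Int) = L then acc.filter (fun c => decide ((c.length : Int) = L)) ++ [x]
      else acc.filter (fun c => decide ((c.length : Int) = L)) := by
  induction acc with
  | nil => simp [PySem.List.insertBy, List.filter]; split_ifs <;> simp_all
  | cons y ys ih =>
    rw [PySem.List.insertBy]
    rcases List.pairwise_cons.mp h with ⟨hy, hys⟩
    by_cases hb : (x.length : Int) < (y.length : Int)
    · simp only [decide_eq_true_eq, hb, if_pos]
      by_cases hx : (x.length : Int) = L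
      · have hnil : (y :: ys).filter (fun c => decide ((c.length : Int) = L)) = [] := by
          rw [List.filter_eq_nil_iff]
          intro z hz
          rcases List.mem_cons.mp hz with rfl | hz
          · simp; omega
          · have := hy z hz; simp; omega
        rw [if_pos hx, hnil, List.filter_cons, hnil]
        simp [hx]
      · rw [if_neg hx, List.filter_cons]
        simp [hx]
    · simp only [decide_eq_true_eq, hb, if_neg, if_false]
      rw [List.filter_cons, List.filter_cons, ih hys]
      by_cases hx : (x.length : Int) = L <;> by_cases hyL : (y.length : Int) = L <;>
        simp [hx, hyL]

theorem pvFilterFoldlIns (L : Int) (xs : List (List Int)) :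
    ∀ (acc : List (List Int)), acc.Pairwise (fun a b => (a.length : Int) ≤ (b.length : Int)) →
    ((xs.foldl (fun acc x =>
        PySem.List.insertBy (fun a b => decide ((a.length : Int) < (b.length : Int))) x acc) acc).filter
      (fun c => decide ((c.length : Int) = L)))
    = acc.filter (fun c => decide ((c.length : Int) = L)) ++ xs.filter (fun c => decide ((c.length : Int) = L)) := by
  induction xs with
  | nil => intro acc _; simp
  | cons x t ih =>
    intro acc hacc
    simp only [List.foldl_cons]
    rw [ih _ (pvInsPairwise x acc hacc), pvFilterInsertBy L x acc hacc, List.filter_cons]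
    by_cases hx : (x.length : Int) = L <;> simp [hx]

theorem pvFilterSorted (L : Int) (move : List (List Int)) :
    (PySem.List.sorted move (fun c => (c.length : Int)) false).filter (fun c => decide ((c.length : Int) = L))
    = move.filter (fun c => decide ((c.length : Int) = L)) := by
  rw [PySem.List.sorted_eq_foldl_insertBy]
  simpa using pvFilterFoldlIns L move [] (List.Pairwise.nil)

theorem pvMemFoldlUnion (ps : List (List Int)) :
    ∀ (s : PySem.Set Int) (n : Int),
    (n ∈ ps.foldl (fun a p => PySem.Set.union a p) s) ↔ n ∈ s ∨ ∃ p ∈ ps, n ∈ p := by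
  induction ps with
  | nil => simp
  | cons p t ih =>
    intro s n
    simp only [List.foldl_cons]
    rw [ih]
    rw [PySem.Set.mem_union]
    constructor
    · rintro (⟨h | h⟩ | ⟨q, hq, hnq⟩)
      · exact Or.inl h
      · exact Or.inr ⟨p, by simp, h⟩
      · exact Or.inr ⟨q, by simp [hq], hnq⟩
    · rintro (h | ⟨q, hq, hnq⟩)
      · exact Or.inl (Or.inl h)
      · rcases List.mem_cons.mp hq with rfl | hq
        · exact Or.inl (Or.inr hnq)
        · exact Or.inr ⟨q, hq, hnq⟩

theorem pvFoldlIteAdd (p : Int → Bool) (xs : List Int) :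
    ∀ (u : PySem.Set Int), xs.Nodup → (∀ n ∈ xs, n ∉ u) →
    xs.foldl (fun u n => if p n then u else PySem.Set.add u n) u
      = u ++ xs.filter (fun n => !p n) := by
  induction xs with
  | nil => simp
  | cons x t ih =>
    intro u hnd hdisj
    simp only [List.foldl_cons, List.filter_cons]
    by_cases hp : p x
    · rw [if_pos hp, ih u hnd.of_cons (fun n hn => hdisj n (by simp [hn]))]
      simp [hp]
    · rw [if_neg hp]
      simp only [Bool.not_eq_true] at hp
      simp only [hp, Bool.not_false]
      rw [PySem.Set.add_of_not_mem (hdisj x (by simp))]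
      rw [ih (u ++ [x]) hnd.of_cons ?_]
      · simp
      · intro n hn
        simp only [List.mem_append, List.mem_singleton]
        rintro (h | rfl)
        · exact hdisj n (by simp [hn]) h
        · exact (List.nodup_cons.mp hnd).1 hn

theorem pvNodupPyRange (n : Int) : (PySem.List.pyRange 0 n 1).Nodup := by
  rw [PySem.List.pyRange]
  simp only [if_neg (by norm_num : ¬ (1 : Int) = 0)]
  apply List.Nodup.map
  · intro a b h
    simpa using h
  · exact List.nodup_range

theorem split_move_eq (move : List (List Int)) (n_points : Int)
    (hne : ∀ c ∈ move, c ≠ ([] : List Int)) :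
    split_move move n_points = split_move_fast move n_points := by
  have hpw : (PySem.List.sorted move (fun c => (c.length : Int)) false).Pairwise
      (fun a b => (a.length : Int) ≤ (b.length : Int)) :=
    PySem.List.sorted_pairwise move (fun c => (c.length : Int))
  have hnes : ∀ c ∈ PySem.List.sorted move (fun c => (c.length : Int)) false, c ≠ [] := by
    intro c hc; exact hne c ((PySem.List.mem_sorted move _ false c).mp hc)
  have hlen0 : ∀ c ∈ PySem.List.sorted move (fun c => (c.length : Int)) false,
      (0 : Int) ≤ (c.length : Int) := by
    intro c _; exact_mod_cast Nat.zero_le _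
  have hmain := pvLoopAB (PySem.List.sorted move (fun c => (c.length : Int)) false)
    PySem.Dict.empty [] 0 hpw hnes
    (by
      intro c hc
      have : c ≠ [] := hnes c hc
      have : 0 < c.length := List.length_pos_iff.mpr this
      omega)
    (by simp [PySem.Dict.values, PySem.Dict.empty])
    (Or.inl (by simp [PySem.Dict.empty]))
    (by simp [PySem.Dict.keys, PySem.Dict.empty])
    (by simp [PySem.Dict.keys, PySem.Dict.empty])
  obtain ⟨Kpw, Kmem⟩ := pvKeysFold (PySem.List.sorted move (fun c => (c.length : Int)) false)
    PySem.Dict.empty 0 hpw hlen0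
    (by simp [PySem.Dict.keys, PySem.Dict.empty])
    (by simp [PySem.Dict.keys, PySem.Dict.empty])
  set D := (PySem.List.sorted move (fun c => (c.length : Int)) false).foldl
      (fun (d : PySem.Dict Int (List Int)) cycle =>
        if (cycle.length : Int) > 1 then
          PySem.Dict.modify d (cycle.length : Int) [] (fun s => PySem.Set.update s cycle)
        else d) PySem.Dict.empty with hD
  have Knodup : D.keys.Nodup := Kpw.imp (fun h => ne_of_lt h)
  have hKmem : ∀ k, k ∈ D.keys ↔ ∃ c ∈ move, 1 < (c.length : Int) ∧ k = (c.length : Int) := by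
    intro k
    rw [Kmem k]
    simp [PySem.Dict.keys, PySem.Dict.empty, PySem.List.mem_sorted]
  have hgB : ∀ k : Int, 1 < k →
      D.getD k []
      = move.foldl (fun (p : List Int) c =>
          if (c.length : Int) = k then PySem.Set.union p (PySem.Set.ofList c) else p) [] := by
    intro k hk
    rw [hD, pvGetDFold, PySem.Dict.getD_empty]
    have hfc : ((PySem.List.sorted move (fun c => (c.length : Int)) false).filter
          (fun c => decide (1 < (c.length : Int)) && decide ((c.length : Int) = k)))
        = (PySem.List.sorted move (fun c => (c.length : Int)) false).filter
          (fun c => decide ((c.length : Int) = k)) := by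
      apply List.filter_congr
      intro c _
      by_cases h : (c.length : Int) = k
      · simp [h, hk]
      · simp [h]
    rw [hfc, pvFilterSorted k move, List.foldl_filter]
    have hfun : (fun (x : List Int) (y : List Int) =>
          if decide ((y.length : Int) = k) = true then PySem.Set.update x y else x)
        = fun (p : List Int) c =>
          if (c.length : Int) = k then PySem.Set.union p (PySem.Set.ofList c) else p := by
      funext p c
      by_cases h : (c.length : Int) = k <;> simp [h, pvUnion_ofList]
    rw [hfun]
  have hlengths : PySem.List.sorted
      (PySem.Set.ofList (move.filterMap
        (fun c => if (c.length : Int) > 1 then some ((c.length : Int)) else none)))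
      (fun x => x) false = D.keys := by
    apply PySem.List.sorted_id_eq_of_perm_of_pairwise
    · rw [List.perm_ext_iff_of_nodup Knodup (PySem.Set.nodup_ofList _)]
      intro k
      rw [PySem.Set.mem_ofList, hKmem k]
      simp only [List.mem_filterMap, Option.ite_none_right_eq_some, Option.some.injEq]
      constructor
      · rintro ⟨c, hc, h1, h2⟩; exact ⟨c, hc, h1, h2.symm⟩
      · rintro ⟨c, hc, h1, h2⟩; exact ⟨c, hc, h1, h2.symm⟩
    · exact Kpw.imp (fun h => le_of_lt h)
  have hmem1 : ∀ k ∈ D.keys, (1 : Int) < k := by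
    intro k hk
    rcases (hKmem k).mp hk with ⟨c, _, h1, h2⟩
    omega
  have hPB : PySem.Dict.values D
      = D.keys.map (fun k => move.foldl (fun (p : List Int) c =>
          if (c.length : Int) = k then PySem.Set.union p (PySem.Set.ofList c) else p) []) := by
    rw [PySem.Dict.values_eq_map_keys D Knodup []]
    apply List.map_congr_left
    intro k hk
    exact hgB k (hmem1 k hk)
  unfold split_move split_move_fast
  simp only []
  rw [hmain, hPB, hlengths]
  rw [PySem.List.foldl_prod_mk
    (f := fun (s : List (List Int)) (e : Int) => s ++ [move.foldl (fun (p : List Int) c =>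
      if (c.length : Int) = e then PySem.Set.union p (PySem.Set.ofList c) else p) []])
    (g := fun (s : List Int) (e : Int) => PySem.Set.union s (move.foldl (fun (p : List Int) c =>
      if (c.length : Int) = e then PySem.Set.union p (PySem.Set.ofList c) else p) []))]
  simp only []
  rw [PySem.List.foldl_append_singleton_eq_map
    (f := fun (e : Int) => move.foldl (fun (p : List Int) c =>
      if (c.length : Int) = e then PySem.Set.union p (PySem.Set.ofList c) else p) []),
    List.nil_append]
  rw [show (List.foldl (fun (s : List Int) (e : Int) => PySem.Set.union s (move.foldl (fun (p : List Int) c =>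
      if (c.length : Int) = e then PySem.Set.union p (PySem.Set.ofList c) else p) [])) [] D.keys)
    = (D.keys.map (fun (e : Int) => move.foldl (fun (p : List Int) c =>
      if (c.length : Int) = e then PySem.Set.union p (PySem.Set.ofList c) else p) [])).foldl
        (fun (a : List Int) p => PySem.Set.union a p) [] from (List.foldl_map).symm]
  set M := D.keys.map (fun (e : Int) => move.foldl (fun (p : List Int) c =>
      if (c.length : Int) = e then PySem.Set.union p (PySem.Set.ofList c) else p) []) with hM
  have hU : (PySem.List.pyRange 0 n_points 1).foldl
      (fun u n => if M.any (fun p => p.contains n) then u else PySem.Set.add u n) []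
      = (PySem.List.pyRange 0 n_points 1).filter
          (fun n => !((M.foldl (fun (a : List Int) p => PySem.Set.union a p) []).contains n)) := by
    rw [pvFoldlIteAdd _ _ [] (pvNodupPyRange n_points) (by simp), List.nil_append]
    apply List.filter_congr
    intro n _
    congr 1
    rw [Bool.eq_iff_iff, List.any_eq_true, List.contains_iff_mem, pvMemFoldlUnion]
    simp [List.contains_iff_mem]
  rw [hU]
  set U := (PySem.List.pyRange 0 n_points 1).filter
      (fun n => !((M.foldl (fun (a : List Int) p => PySem.Set.union a p) []).contains n)) with hUdef
  by_cases hemp : U = []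
  · rw [if_neg (by rw [hemp]; exact lt_irrefl 0), if_neg (not_not_intro hemp)]
  · rw [if_pos (List.length_pos_iff.mpr hemp), if_pos hemp]

theorem pvItemsUpdateMem {pairs : List (String × List (List Int))} :
    ∀ (d : PySem.Dict String (List (List Int))) (p : String × List (List Int)),
    p ∈ (d.update pairs).items → p ∈ d.items ∨ p ∈ pairs := by
  induction pairs with
  | nil => intro d p h; exact Or.inl (by simpa [PySem.Dict.update] using h)
  | cons q t ih =>
    intro d p h
    have h' : p ∈ ((d.insert q.1 q.2).update t).items := by
      simpa [PySem.Dict.update] using h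
    rcases ih _ _ h' with h'' | h''
    · rcases (PySem.Dict.mem_items_insert d q.1 q.2 p).mp h'' with h3 | h3
      · exact Or.inr (by simp [h3])
      · exact Or.inl h3.1
    · exact Or.inr (by simp [h''])

theorem pvItemsOfListMem {pairs : List (String × List (List Int))} {p : String × List (List Int)}
    (h : p ∈ (PySem.Dict.ofList pairs).items) : p ∈ pairs := by
  rcases pvItemsUpdateMem PySem.Dict.empty p (by simpa [PySem.Dict.ofList] using h) with h' | h'
  · simp [PySem.Dict.empty] at h'
  · exact h'

-- A's fused loop (skip + split) equals B's keep-loop followed by a map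
theorem pvOuterAB (n_points : Int) (invD : PySem.Dict String String)
    (items : List (String × List (List Int))) :
    ∀ (cal : PySem.Set String) (accB : List (List (List Int))),
    (∀ p ∈ items, split_move p.2 n_points = split_move_fast p.2 n_points) →
    (items.foldl (fun (st : PySem.Set String × List (List (List Int))) p =>
        match invD.get? p.1 with
        | some i => if st.1.contains i then st
                    else (PySem.Set.add st.1 p.1, st.2 ++ [split_move p.2 n_points])
        | none => (PySem.Set.add st.1 p.1, st.2 ++ [split_move p.2 n_points]))
      (cal, accB.map (fun cycles => split_move_fast cycles n_points))).2
    = ((items.foldl (fun (st : PySem.Set String × List (List (List Int))) p =>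
        match invD.get? p.1 with
        | some i => if st.1.contains i then st
                    else (PySem.Set.add st.1 p.1, st.2 ++ [p.2])
        | none => (PySem.Set.add st.1 p.1, st.2 ++ [p.2]))
      (cal, accB)).2).map (fun cycles => split_move_fast cycles n_points) := by
  induction items with
  | nil => intro cal accB _; simp
  | cons p t ih =>
    intro cal accB hsm
    have hp : split_move p.2 n_points = split_move_fast p.2 n_points := hsm p (by simp)
    have hsmt : ∀ q ∈ t, split_move q.2 n_points = split_move_fast q.2 n_points :=
      fun q hq => hsm q (by simp [hq])
    simp only [List.foldl_cons]
    cases hg : invD.get? p.1 with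
    | none =>
      have : (accB.map (fun cycles => split_move_fast cycles n_points)) ++ [split_move p.2 n_points]
          = (accB ++ [p.2]).map (fun cycles => split_move_fast cycles n_points) := by
        simp [hp]
      rw [this]
      exact ih _ _ hsmt
    | some i =>
      by_cases hc : cal.contains i
      · simp only [if_pos hc]
        exact ih _ _ hsmt
      · simp only [if_neg hc]
        have : (accB.map (fun cycles => split_move_fast cycles n_points)) ++ [split_move p.2 n_points]
            = (accB ++ [p.2]).map (fun cycles => split_move_fast cycles n_points) := by
          simp [hp]
        rw [this]
        exact ih _ _ hsmt

-- the no-inverse-dict branch: the fused loop is a plain map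
theorem pvNoInvLoop (n_points : Int) (items : List (String × List (List Int))) :
    ∀ (cal : PySem.Set String) (acc : List (List (List Int))),
    (items.foldl (fun (st : PySem.Set String × List (List (List Int))) p =>
        (st.1, st.2 ++ [split_move p.2 n_points])) (cal, acc)).2
    = acc ++ items.map (fun p => split_move p.2 n_points) := by
  induction items with
  | nil => intro cal acc; simp
  | cons p t ih => intro cal acc; simp only [List.foldl_cons]; rw [ih]; simp

-- ===== VERDICT (by name: the statement is the Claim_ definition above) =====
theorem split_moves_spec : Claim_equal_split_moves := by
  intro moves n_points inverse_dict _ hpre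
  unfold Spec_split_moves split_moves split_moves_alt
  simp only []
  have hsm : ∀ p ∈ (PySem.Dict.ofList moves).items,
      split_move p.2 n_points = split_move_fast p.2 n_points := by
    intro p hp
    exact split_move_eq p.2 n_points (hpre p (pvItemsOfListMem hp))
  by_cases hcase : inverse_dict.getD [] = []
  · simp only [hcase, ne_eq, not_true_eq_false, if_false, ite_false]
    rw [pvNoInvLoop n_points _ PySem.Set.empty []]
    simp only [List.nil_append, PySem.Dict.values, List.map_map]
    apply List.map_congr_left
    intro p hp
    exact hsm p hp
  · simp only [ne_eq, hcase, not_false_eq_true, if_true, ite_true]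
    have := pvOuterAB n_points (PySem.Dict.ofList (inverse_dict.getD []))
      (PySem.Dict.ofList moves).items PySem.Set.empty [] hsm
    simpa using this
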